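-- pv_equiv track=rewrite | github.com/GundalaNikhil/DSA | dsa-problems/Bitwise/testcases/comprehensive_generator.py | sol_009
-- ===== SOURCE A (Python) =====
-- from typing import List, Tuple
--
-- def sol_009(a: List[int]) -> int:
--     """BIT-009: Smallest Absent XOR"""
--     basis = [0] * 30
--     for x in a:
--         cur = x
--         for i in range(29, -1, -1):
--             if not (cur & (1 << i)):
--                 continue
--             if basis[i] == 0:
--                 basis[i] = cur
--                 break
--             cur ^= basis[i]
--
--     for i in range(30):
--         if basis[i] == 0:
--             return 1 << i
--     return 1 << 30
-- ===== SOURCE B (Python) =====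
-- from typing import List
--
-- def sol_009(a: List[int]) -> int:
--     """BIT-009: Smallest Absent XOR — flat independent-vector basis instead of a 30-slot array."""
--     basis = []  # independent nonzero 30-bit vectors, pairwise distinct leading bits
--     for x in a:
--         v = x & ((1 << 30) - 1)
--         for b in basis:
--             v = min(v, v ^ b)
--         if v:
--             basis.append(v)
--     leads = [b.bit_length() - 1 for b in basis]
--     for i in range(30):
--         if i not in leads:
--             return 1 << i
--     return 1 << 30
-- ===== Notes on version B (the rewrite author's own statement) =====
-- stated objective: alternative
-- what changed: B replaces A's 30-slot bit-indexed basis array and per-bit inner scan by a flat list of independent reduced vectors (each new element is greedily minimised against every stored vector via min(v, v^b) and appended if nonzero), with the pivot bit positions recovered in a separate bit_length pass at the end.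
import Mathlib
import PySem

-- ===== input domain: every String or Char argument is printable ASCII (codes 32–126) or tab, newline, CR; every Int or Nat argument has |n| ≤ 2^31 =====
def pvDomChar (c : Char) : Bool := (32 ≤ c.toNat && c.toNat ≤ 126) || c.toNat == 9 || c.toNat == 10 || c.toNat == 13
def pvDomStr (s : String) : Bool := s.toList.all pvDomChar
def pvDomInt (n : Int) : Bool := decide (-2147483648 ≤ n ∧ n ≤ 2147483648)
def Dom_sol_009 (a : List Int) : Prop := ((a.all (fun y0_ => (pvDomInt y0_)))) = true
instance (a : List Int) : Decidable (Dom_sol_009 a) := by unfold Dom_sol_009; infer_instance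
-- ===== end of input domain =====

-- B replaces A's 30-slot bit-indexed basis array by a flat list of independent reduced
-- vectors with a separate leading-bit recovery pass (alternative decomposition, same cost).

-- ===== PORT A =====
-- inner 'for i in range(29,-1,-1)' with continue/break; called with [29,…,0]
def sol009InnerA (basis : List Int) (cur : Int) : List Nat → List Int
  | [] => basis
  | i :: rest =>
    if PySem.Int.band cur ((1 : Int) <<< i) = 0 then sol009InnerA basis cur rest
    else if basis.getD i 0 = 0 then basis.set i cur
    else sol009InnerA basis (PySem.Int.bxor cur (basis.getD i 0)) rest

-- final 'for i in range(30): if basis[i]==0: return 1<<i' with fallthrough 'return 1<<30'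
def sol009ScanA (basis : List Int) : List Nat → Int
  | [] => (1 : Int) <<< (30 : Nat)
  | i :: rest => if basis.getD i 0 = 0 then (1 : Int) <<< i else sol009ScanA basis rest

def sol_009 (a : List Int) : Int :=
  let basis := a.foldl (fun b x => sol009InnerA b x ((List.range 30).reverse)) (List.replicate 30 0)
  sol009ScanA basis (List.range 30)

-- ===== PORT B =====
-- 'for b in basis: v = min(v, v ^ b)'
def sol009Reduce (basis : List Int) (v : Int) : Int :=
  basis.foldl (fun v b => min v (PySem.Int.bxor v b)) v

-- the main loop of B: mask x to 30 bits, reduce against the list, append if nonzero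
def sol009BasisB (a : List Int) : List Int :=
  a.foldl
    (fun basis x =>
      let v := sol009Reduce basis (PySem.Int.band x (((1 : Int) <<< (30 : Nat)) - 1))
      if v ≠ 0 then basis ++ [v] else basis)
    []

-- 'for i in range(30): if i not in leads: return 1<<i' with fallthrough
def sol009ScanB (leads : List Int) : List Nat → Int
  | [] => (1 : Int) <<< (30 : Nat)
  | i :: rest => if ¬ leads.contains (i : Int) then (1 : Int) <<< i else sol009ScanB leads rest

def sol_009_alt (a : List Int) : Int :=
  let basis := sol009BasisB a
  let leads := basis.map (fun b => ((PySem.Int.bitLength b : Int) - 1))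
  sol009ScanB leads (List.range 30)

-- ===== PRECONDITION & SPEC =====
def Spec_sol_009 (a : List Int) (out : Int) : Prop := out = sol_009_alt a
instance (a : List Int) (out : Int) : Decidable (Spec_sol_009 a out) := by unfold Spec_sol_009; infer_instance

-- ===== CLAIM (what is proved, stated in full; the proofs are below) =====
def Claim_equal_sol_009 : Prop := ∀ (a : List Int), Dom_sol_009 a → Spec_sol_009 a (sol_009 a)

-- ===== LEMMAS AND PROOFS =====

def pv30 (x : Int) : Nat := (PySem.Int.band x (((1 : Int) <<< (30 : Nat)) - 1)).toNat
def pvLd (n : Nat) : Nat := PySem.Int.bitLength (n : Int) - 1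

theorem pv_mask_eq : (((1:Int) <<< (30:Nat)) - 1) = ((2^30 - 1 : Nat) : Int) := by decide

theorem pv_shl_eq (i : Nat) : ((1:Int) <<< i) = ((2^i : Nat) : Int) := by
  rw [Int.shiftLeft_eq]
  push_cast
  ring

theorem pv_band_negSucc (k m : Nat) :
    PySem.Int.band (Int.negSucc k) (m : Int) = ((m - (m &&& k) : Nat) : Int) := by
  have h : ¬ ((0:Int) ≤ Int.negSucc k) := by simp [Int.negSucc_eq]; omega
  have h2 : (-(Int.negSucc k) - 1) = (k : Int) := by simp [Int.negSucc_eq]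
  simp only [PySem.Int.band, if_neg h, if_pos (Int.natCast_nonneg m), h2,
    Int.toNat_natCast]

theorem pv30_ofNat (n : Nat) : pv30 (Int.ofNat n) = n % 2^30 := by
  show (PySem.Int.band (Int.ofNat n) _).toNat = _
  rw [pv_mask_eq, show (Int.ofNat n) = (n:Int) from rfl, PySem.Int.band_natCast,
    Int.toNat_natCast, Nat.and_two_pow_sub_one_eq_mod]

theorem pv30_negSucc (k : Nat) : pv30 (Int.negSucc k) = (2^30 - 1) - k % 2^30 := by
  show (PySem.Int.band (Int.negSucc k) _).toNat = _
  rw [pv_mask_eq, pv_band_negSucc, Int.toNat_natCast, Nat.land_comm,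
    Nat.and_two_pow_sub_one_eq_mod]

theorem pv30_lt (x : Int) : pv30 x < 2^30 := by
  cases x with
  | ofNat n => rw [pv30_ofNat]; exact Nat.mod_lt _ (by norm_num)
  | negSucc k => rw [pv30_negSucc]; omega

theorem pv30_testBit (x : Int) (i : Nat) :
    (pv30 x).testBit i = (decide (i < 30) && Int.testBit x i) := by
  cases x with
  | ofNat n =>
    rw [pv30_ofNat, Nat.testBit_mod_two_pow]
    rfl
  | negSucc k =>
    rw [pv30_negSucc]
    by_cases hi : i < 30
    · have h1 : (2:Nat)^30 - 1 - k % 2^30 = 2^30 - (k % 2^30 + 1) := by omega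
      rw [h1, Nat.testBit_two_pow_sub_succ (Nat.mod_lt _ (by norm_num)), Nat.testBit_mod_two_pow]
      simp [hi, Int.testBit]
    · have hb : ((2:Nat)^30 - 1 - k % 2^30) < 2^i := by
        calc (2:Nat)^30 - 1 - k % 2^30 < 2^30 := by omega
        _ ≤ 2^i := Nat.pow_le_pow_right (by norm_num) (by omega)
      rw [Nat.testBit_lt_two_pow hb]
      simp [hi]

theorem pv_bxor_eq (a b : Int) : PySem.Int.bxor a b = Int.xor a b := by
  have h : ∀ k : Nat, ¬ ((0:Int) ≤ Int.negSucc k) := fun k => by simp [Int.negSucc_eq]; omega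
  cases a with
  | ofNat m => cases b with
    | ofNat n => simp [PySem.Int.bxor, Int.xor]
    | negSucc n =>
      simp [PySem.Int.bxor, Int.xor, Int.negSucc_eq]
      omega
  | negSucc m => cases b with
    | ofNat n =>
      simp [PySem.Int.bxor, Int.xor, Int.negSucc_eq]
      omega
    | negSucc n =>
      simp [PySem.Int.bxor, Int.xor, h]

theorem pv30_bxor (a b : Int) : pv30 (PySem.Int.bxor a b) = pv30 a ^^^ pv30 b := by
  apply Nat.eq_of_testBit_eq
  intro i
  rw [Nat.testBit_xor, pv30_testBit, pv30_testBit, pv30_testBit, pv_bxor_eq, Int.testBit_lxor]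
  by_cases hi : i < 30 <;> simp [hi]

theorem pv_band_pow_eq_zero (x : Int) (i : Nat) (hi : i < 30) :
    (PySem.Int.band x ((1:Int) <<< i) = 0) ↔ (pv30 x).testBit i = false := by
  rw [pv30_testBit, pv_shl_eq]
  have hp : (0:Nat) < 2^i := Nat.two_pow_pos i
  cases x with
  | ofNat n =>
    rw [show (Int.ofNat n) = (n:Int) from rfl, PySem.Int.band_natCast, Nat.and_two_pow]
    simp only [Int.testBit, hi, decide_true, Bool.true_and]
    cases hn : n.testBit i <;> simp
  | negSucc k =>
    rw [pv_band_negSucc, Nat.land_comm, Nat.and_two_pow]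
    simp only [Int.testBit, hi, decide_true, Bool.true_and]
    cases hk : k.testBit i <;> simp

theorem pv_ld_bounds (n : Nat) (h : n ≠ 0) : 2 ^ pvLd n ≤ n ∧ n < 2 ^ (pvLd n + 1) := by
  have h1 := PySem.Int.lt_two_pow_bitLength (n : Int)
  have h2 := PySem.Int.two_pow_bitLength_le (n : Int) (by exact_mod_cast h)
  rw [Int.natAbs_natCast] at h1 h2
  have hbl : PySem.Int.bitLength (n : Int) ≠ 0 := by
    intro h0; rw [h0] at h1; omega
  have heq : pvLd n + 1 = PySem.Int.bitLength (n : Int) := by unfold pvLd; omega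
  refine ⟨by unfold pvLd; exact h2, ?_⟩
  rw [heq]; exact h1

theorem pv_bitLength_eq (n : Nat) (h : n ≠ 0) :
    PySem.Int.bitLength (n : Int) = pvLd n + 1 := by
  have h2 := PySem.Int.two_pow_bitLength_le (n : Int) (by exact_mod_cast h)
  have h1 := PySem.Int.lt_two_pow_bitLength (n : Int)
  rw [Int.natAbs_natCast] at h1 h2
  have hbl : PySem.Int.bitLength (n : Int) ≠ 0 := by intro h0; rw [h0] at h1; omega
  unfold pvLd; omega

theorem pvLd_testBit (n : Nat) (h : n ≠ 0) : n.testBit (pvLd n) = true := by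
  obtain ⟨h1, h2⟩ := pv_ld_bounds n h
  have hd : n / 2 ^ pvLd n = 1 := by
    have := Nat.pow_succ 2 (pvLd n)
    refine Nat.div_eq_of_lt_le (by omega) (by omega)
  simp [Nat.testBit, Nat.shiftRight_eq_div_pow, hd]

theorem pv_testBit_gt_ld (n : Nat) (j : Nat) (h : pvLd n < j) : n.testBit j = false := by
  by_cases h0 : n = 0
  · simp [h0]
  · obtain ⟨h1, h2⟩ := pv_ld_bounds n h0
    exact Nat.testBit_lt_two_pow (lt_of_lt_of_le h2 (Nat.pow_le_pow_right (by norm_num) (by omega)))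

theorem pvLd_eq_of (n i : Nat) (h1 : n.testBit i = true) (h2 : ∀ j, i < j → n.testBit j = false) :
    pvLd n = i := by
  have h0 : n ≠ 0 := by intro h; rw [h] at h1; simp at h1
  rcases lt_trichotomy (pvLd n) i with h | h | h
  · rw [pv_testBit_gt_ld n i h] at h1; exact absurd h1 (by simp)
  · exact h
  · exact absurd (pvLd_testBit n h0) (by simp [h2 (pvLd n) h])

inductive pvSp (L : List Nat) : Nat → Prop
  | zero : pvSp L 0
  | step {b v : Nat} : b ∈ L → pvSp L v → pvSp L (b ^^^ v)

theorem pvSp.xor {L : List Nat} {v w : Nat} (hv : pvSp L v) (hw : pvSp L w) :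
    pvSp L (v ^^^ w) := by
  induction hv with
  | zero => simpa using hw
  | step hb _ ih => rw [Nat.xor_assoc]; exact pvSp.step hb ih

theorem pvSp.mono {L L' : List Nat} (h : ∀ b ∈ L, b ∈ L') {v : Nat} (hv : pvSp L v) :
    pvSp L' v := by
  induction hv with
  | zero => exact pvSp.zero
  | step hb _ ih => exact pvSp.step (h _ hb) ih

theorem pvSp_nil {v : Nat} (h : pvSp [] v) : v = 0 := by
  induction h with
  | zero => rfl
  | step hb _ _ => simp at hb

theorem pvSp_cons {b : Nat} {L : List Nat} {v : Nat} (h : pvSp (b :: L) v) :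
    pvSp L v ∨ ∃ u, pvSp L u ∧ v = b ^^^ u := by
  induction h with
  | zero => exact Or.inl pvSp.zero
  | step hc hv ih =>
    rename_i c w
    rcases List.mem_cons.mp hc with rfl | hcL
    · rcases ih with h | ⟨u, hu, rfl⟩
      · exact Or.inr ⟨w, h, rfl⟩
      · left
        have : c ^^^ (c ^^^ u) = u := by
          rw [← Nat.xor_assoc, Nat.xor_self, Nat.zero_xor]
        rw [this]; exact hu
    · rcases ih with h | ⟨u, hu, rfl⟩
      · exact Or.inl (pvSp.step hcL h)
      · right
        refine ⟨c ^^^ u, pvSp.step hcL hu, ?_⟩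
        rw [← Nat.xor_assoc, ← Nat.xor_assoc, Nat.xor_comm c b]

theorem pv_ldXor {a b : Nat} (ha : a ≠ 0) (hb : b ≠ 0) (hne : pvLd a ≠ pvLd b) :
    a ^^^ b ≠ 0 ∧ pvLd (a ^^^ b) = max (pvLd a) (pvLd b) := by
  rcases Nat.lt_or_ge (pvLd b) (pvLd a) with h | h
  · have hM : (a ^^^ b).testBit (pvLd a) = true := by
      rw [Nat.testBit_xor, pvLd_testBit a ha, pv_testBit_gt_ld b _ h]; rfl
    have hne0 : a ^^^ b ≠ 0 := by intro h0; rw [h0] at hM; simp at hM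
    refine ⟨hne0, ?_⟩
    rw [Nat.max_eq_left (le_of_lt h)]
    refine pvLd_eq_of _ _ hM (fun j hj => ?_)
    rw [Nat.testBit_xor, pv_testBit_gt_ld a _ hj, pv_testBit_gt_ld b _ (lt_trans h hj)]; rfl
  · have h' : pvLd a < pvLd b := lt_of_le_of_ne h (fun he => hne he)
    have hM : (a ^^^ b).testBit (pvLd b) = true := by
      rw [Nat.testBit_xor, pvLd_testBit b hb, pv_testBit_gt_ld a _ h']; rfl
    have hne0 : a ^^^ b ≠ 0 := by intro h0; rw [h0] at hM; simp at hM
    refine ⟨hne0, ?_⟩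
    rw [Nat.max_eq_right (le_of_lt h')]
    refine pvLd_eq_of _ _ hM (fun j hj => ?_)
    rw [Nat.testBit_xor, pv_testBit_gt_ld a _ (lt_trans h' hj), pv_testBit_gt_ld b _ hj]; rfl

theorem pvSp_lead : ∀ (L : List Nat), List.Pairwise (fun b c => pvLd b ≠ pvLd c) L →
    (∀ b ∈ L, b ≠ 0) → ∀ {v : Nat}, pvSp L v → v ≠ 0 → ∃ b ∈ L, pvLd v = pvLd b := by
  intro L
  induction L with
  | nil => intro _ _ v hv hne; exact absurd (pvSp_nil hv) hne
  | cons b L ih =>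
    intro hpw hnz v hv hne
    rcases pvSp_cons hv with h | ⟨u, hu, rfl⟩
    · obtain ⟨c, hc, he⟩ := ih hpw.of_cons (fun c hc => hnz c (List.mem_cons_of_mem _ hc)) h hne
      exact ⟨c, List.mem_cons_of_mem _ hc, he⟩
    · by_cases hu0 : u = 0
      · subst hu0
        simp only [Nat.xor_zero]
        exact ⟨b, List.mem_cons_self, rfl⟩
      · obtain ⟨c, hc, he⟩ := ih hpw.of_cons (fun c hc => hnz c (List.mem_cons_of_mem _ hc)) hu hu0
        have hbne : pvLd b ≠ pvLd u := by
          rw [he]; exact (List.pairwise_cons.mp hpw).1 c hc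
        obtain ⟨_, hmax⟩ := pv_ldXor (hnz b List.mem_cons_self) hu0 hbne
        rcases Nat.le_total (pvLd b) (pvLd u) with hle | hle
        · refine ⟨c, List.mem_cons_of_mem _ hc, ?_⟩
          rw [hmax, Nat.max_eq_right hle, he]
        · exact ⟨b, List.mem_cons_self, by rw [hmax, Nat.max_eq_left hle]⟩

def pvStair (L : List Nat) : Prop :=
  List.Pairwise (fun b c => c.testBit (pvLd b) = false) L

def pvRed (L : List Nat) (v : Nat) : Nat := L.foldl (fun v b => min v (v ^^^ b)) v

theorem pvRed_cons (b : Nat) (L : List Nat) (v : Nat) :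
    pvRed (b :: L) v = pvRed L (min v (v ^^^ b)) := rfl

theorem pv_minXor (v b : Nat) (hb : b ≠ 0) :
    (min v (v ^^^ b)).testBit (pvLd b) = false := by
  have hd : (v ^^^ b).testBit (pvLd b) = !v.testBit (pvLd b) := by
    rw [Nat.testBit_xor, pvLd_testBit b hb, Bool.xor_true]
  have habove : ∀ j, pvLd b < j → (v ^^^ b).testBit j = v.testBit j := by
    intro j hj
    rw [Nat.testBit_xor, pv_testBit_gt_ld b _ hj, Bool.xor_false]
  cases hv : v.testBit (pvLd b) with
  | false =>
    have : v < v ^^^ b :=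
      Nat.lt_of_testBit (pvLd b) hv (by rw [hd, hv]; rfl)
        (fun j hj => (habove j hj).symm)
    rw [min_eq_left (le_of_lt this), hv]
  | true =>
    have : v ^^^ b < v :=
      Nat.lt_of_testBit (pvLd b) (by rw [hd, hv]; rfl) hv (fun j hj => habove j hj)
    rw [min_eq_right (le_of_lt this), hd, hv]; rfl

theorem pvRed_preserve (L : List Nat) (v : Nat) (i : Nat)
    (hL : ∀ b ∈ L, b.testBit i = false) (hv : v.testBit i = false) :
    (pvRed L v).testBit i = false := by
  induction L generalizing v with
  | nil => exact hv
  | cons b L ih =>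
    apply ih _ (fun c hc => hL c (List.mem_cons_of_mem _ hc))
    simp only
    rcases min_choice v (v ^^^ b) with h | h <;> rw [h]
    · exact hv
    · rw [Nat.testBit_xor, hv, hL b List.mem_cons_self]; rfl

theorem pvRed_le (L : List Nat) (v : Nat) : pvRed L v ≤ v := by
  induction L generalizing v with
  | nil => exact le_refl v
  | cons b L ih =>
    rw [pvRed_cons]
    calc pvRed L (min v (v ^^^ b)) ≤ min v (v ^^^ b) := ih _
    _ ≤ v := min_le_left _ _

theorem pvRed_coset (L : List Nat) (v : Nat) : ∃ s, pvSp L s ∧ pvRed L v = v ^^^ s := by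
  induction L generalizing v with
  | nil => exact ⟨0, pvSp.zero, by simp [pvRed]⟩
  | cons b L ih =>
    obtain ⟨s, hs, he⟩ := ih (min v (v ^^^ b))
    have hmono := pvSp.mono (fun c hc => List.mem_cons_of_mem b hc) hs
    rcases min_choice v (v ^^^ b) with h | h
    · refine ⟨s, hmono, ?_⟩
      rw [pvRed_cons, he, h]
    · refine ⟨b ^^^ s, pvSp.step List.mem_cons_self hmono, ?_⟩
      rw [pvRed_cons, he, h, Nat.xor_assoc]

theorem pvRed_clears (L : List Nat) (v : Nat) (hnz : ∀ b ∈ L, b ≠ 0) (hst : pvStair L) :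
    ∀ b ∈ L, (pvRed L v).testBit (pvLd b) = false := by
  induction L generalizing v with
  | nil => intro b hb; simp at hb
  | cons c L ih =>
    intro b hb
    rcases List.mem_cons.mp hb with rfl | hbL
    · rw [pvRed_cons]
      apply pvRed_preserve
      · exact fun d hd => (List.pairwise_cons.mp hst).1 d hd
      · exact pv_minXor v b (hnz b List.mem_cons_self)
    · rw [pvRed_cons]
      exact ih _ (fun d hd => hnz d (List.mem_cons_of_mem _ hd)) hst.of_cons b hbL

def pvE (basis : List Int) : List Nat :=
  ((List.range 30).filter (fun i => decide (basis.getD i 0 ≠ 0))).map (fun i => pv30 (basis.getD i 0))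

def pvInvA (basis : List Int) : Prop :=
  basis.length = 30 ∧
  ∀ i, i < 30 → basis.getD i 0 ≠ 0 →
    ((pv30 (basis.getD i 0)).testBit i = true ∧ ∀ j, i < j → (pv30 (basis.getD i 0)).testBit j = false)

theorem pvE_mem (basis : List Int) (e : Nat) :
    e ∈ pvE basis ↔ ∃ i, i < 30 ∧ basis.getD i 0 ≠ 0 ∧ e = pv30 (basis.getD i 0) := by
  simp [pvE, List.mem_filter, List.mem_range]
  constructor
  · rintro ⟨i, ⟨hi, hnz⟩, he⟩; exact ⟨i, hi, hnz, he.symm⟩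
  · rintro ⟨i, hi, hnz, he⟩; exact ⟨i, ⟨hi, hnz⟩, he.symm⟩

theorem pv_getD_set (basis : List Int) (j i : Nat) (c : Int) (hj : j < basis.length) :
    (basis.set j c).getD i 0 = if i = j then c else basis.getD i 0 := by
  by_cases h : i = j
  · subst h; simp [List.getD, hj]

  · have h' : ¬ j = i := fun hh => h hh.symm
    simp [List.getD, h, h']

theorem pv_range_rev_succ (f : Nat) :
    (List.range (f+1)).reverse = f :: (List.range f).reverse := by
  rw [List.range_succ, List.reverse_append, List.reverse_singleton]; rfl

theorem pvInner_spec : ∀ (fuel : Nat), fuel ≤ 30 → ∀ (basis : List Int) (cur : Int),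
    pvInvA basis →
    (∀ j, fuel ≤ j → (pv30 cur).testBit j = false) →
    (sol009InnerA basis cur ((List.range fuel).reverse) = basis ∧ pvSp (pvE basis) (pv30 cur))
    ∨ (∃ j c s, j < fuel ∧ pvSp (pvE basis) s ∧ basis.getD j 0 = 0 ∧
        sol009InnerA basis cur ((List.range fuel).reverse) = basis.set j c ∧
        pv30 c = pv30 cur ^^^ s ∧ (pv30 c).testBit j = true ∧
        (∀ j', j < j' → (pv30 c).testBit j' = false)) := by
  intro fuel
  induction fuel with
  | zero =>
    intro _ basis cur _ hbits
    left
    constructor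
    · rfl
    · have : pv30 cur = 0 := Nat.eq_of_testBit_eq (fun i => by rw [hbits i (Nat.zero_le i)]; simp)
      rw [this]; exact pvSp.zero
  | succ f ih =>
    intro hle basis cur hinv hbits
    have hf30 : f < 30 := by omega
    rw [pv_range_rev_succ]
    show _ ∨ _
    rw [show sol009InnerA basis cur (f :: (List.range f).reverse) =
        (if PySem.Int.band cur ((1 : Int) <<< f) = 0 then sol009InnerA basis cur ((List.range f).reverse)
         else if basis.getD f 0 = 0 then basis.set f cur
         else sol009InnerA basis (PySem.Int.bxor cur (basis.getD f 0)) ((List.range f).reverse)) from rfl]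
    by_cases hbit : PySem.Int.band cur ((1 : Int) <<< f) = 0
    · rw [if_pos hbit]
      have hbf : (pv30 cur).testBit f = false := (pv_band_pow_eq_zero cur f hf30).mp hbit
      have hb' : ∀ j, f ≤ j → (pv30 cur).testBit j = false := by
        intro j hj
        rcases Nat.eq_or_lt_of_le hj with rfl | hj'
        · exact hbf
        · exact hbits j (by omega)
      rcases ih (by omega) basis cur hinv hb' with h | ⟨j, c, s, hj, hrest⟩
      · exact Or.inl h
      · exact Or.inr ⟨j, c, s, by omega, hrest⟩
    · rw [if_neg hbit]
      have hbf : (pv30 cur).testBit f = true := by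
        cases h : (pv30 cur).testBit f
        · exact absurd ((pv_band_pow_eq_zero cur f hf30).mpr h) hbit
        · rfl
      by_cases hvac : basis.getD f 0 = 0
      · rw [if_pos hvac]
        right
        refine ⟨f, cur, 0, by omega, pvSp.zero, hvac, rfl, by rw [Nat.xor_zero], hbf, ?_⟩
        exact fun j' hj' => hbits j' (by omega)
      · rw [if_neg hvac]
        set e := basis.getD f 0 with he
        have hmem : pv30 e ∈ pvE basis := (pvE_mem basis _).mpr ⟨f, hf30, hvac, rfl⟩
        obtain ⟨hbe, habove⟩ := hinv.2 f hf30 hvac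
        have hcur' : pv30 (PySem.Int.bxor cur e) = pv30 cur ^^^ pv30 e := pv30_bxor cur e
        have hbits' : ∀ j, f ≤ j → (pv30 (PySem.Int.bxor cur e)).testBit j = false := by
          intro j hj
          rw [hcur', Nat.testBit_xor]
          rcases Nat.eq_or_lt_of_le hj with rfl | hj'
          · rw [hbf, hbe]; rfl
          · rw [hbits j (by omega), habove j hj']; rfl
        rcases ih (by omega) basis (PySem.Int.bxor cur e) hinv hbits' with ⟨hres, hsp⟩ | hcase
        · left
          refine ⟨hres, ?_⟩
          have : pv30 cur = pv30 e ^^^ (pv30 cur ^^^ pv30 e) := by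
            rw [Nat.xor_comm (pv30 cur), ← Nat.xor_assoc, Nat.xor_self, Nat.zero_xor]
          rw [this]
          exact pvSp.step hmem (hcur' ▸ hsp)
        · obtain ⟨j, c, s, hj, hsps, hvacj, hres, hc, hcb, hcab⟩ := hcase
          right
          refine ⟨j, c, pv30 e ^^^ s, by omega, pvSp.step hmem hsps, hvacj, hres, ?_, hcb, hcab⟩
          rw [hc, hcur', Nat.xor_assoc]

theorem pv_testBit_ne_zero {n : Nat} {i : Nat} (h : n.testBit i = true) : n ≠ 0 := by
  intro h0; rw [h0] at h; simp at h

theorem pvStair_ldNe (L : List Nat) (hnz : ∀ b ∈ L, b ≠ 0) (hst : pvStair L) :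
    List.Pairwise (fun b c => pvLd b ≠ pvLd c) L := by
  refine List.Pairwise.imp_of_mem ?_ hst
  intro b c hb hc hbit he
  rw [he] at hbit
  exact absurd (pvLd_testBit c (hnz c hc)) (by rw [hbit]; simp)

theorem pvSp_ext_iff {L1 L2 : List Nat} (h : ∀ e, e ∈ L1 ↔ e ∈ L2) (w : Nat) :
    pvSp L1 w ↔ pvSp L2 w :=
  ⟨pvSp.mono (fun b hb => (h b).mp hb), pvSp.mono (fun b hb => (h b).mpr hb)⟩

theorem pvSp_cons_congr {L L' : List Nat} {b b' : Nat}
    (hLL : ∀ u, pvSp L u ↔ pvSp L' u)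
    (hd : pvSp L (b ^^^ b')) (w : Nat) :
    pvSp (b :: L) w ↔ pvSp (b' :: L') w := by
  have key : ∀ (M M' : List Nat) (c c' : Nat), (∀ u, pvSp M u ↔ pvSp M' u) →
      pvSp M (c ^^^ c') → ∀ w, pvSp (c :: M) w → pvSp (c' :: M') w := by
    intro M M' c c' hMM hdd w hw
    rcases pvSp_cons hw with h | ⟨u, hu, rfl⟩
    · exact pvSp.mono (fun e he => List.mem_cons_of_mem _ he) ((hMM w).mp h)
    · have : c ^^^ u = c' ^^^ ((c ^^^ c') ^^^ u) := by
        apply Nat.eq_of_testBit_eq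
        intro i
        simp only [Nat.testBit_xor]
        cases c.testBit i <;> cases c'.testBit i <;> cases u.testBit i <;> rfl
      rw [this]
      exact pvSp.step List.mem_cons_self
        (pvSp.mono (fun e he => List.mem_cons_of_mem _ he)
          ((hMM _).mp (pvSp.xor hdd hu)))
  constructor
  · exact key L L' b b' hLL hd w
  · refine key L' L b' b (fun u => (hLL u).symm) ?_ w
    rw [Nat.xor_comm]
    exact (hLL _).mp hd

def pvInv2 (basis : List Int) (L : List Nat) : Prop :=
  pvInvA basis ∧ (∀ b ∈ L, b ≠ 0 ∧ b < 2^30) ∧ pvStair L ∧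
  (∀ i, i < 30 → (basis.getD i 0 ≠ 0 ↔ ∃ b ∈ L, pvLd b = i)) ∧
  (∀ v, pvSp (pvE basis) v ↔ pvSp L v)

theorem pvStep (basis : List Int) (L : List Nat) (h : pvInv2 basis L) (x : Int) :
    pvInv2 (sol009InnerA basis x ((List.range 30).reverse))
      (if pvRed L (pv30 x) ≠ 0 then L ++ [pvRed L (pv30 x)] else L) := by
  obtain ⟨hA, hBn, hstair, hbij, hspan⟩ := h
  have hBnz : ∀ b ∈ L, b ≠ 0 := fun b hb => (hBn b hb).1
  have hldne : List.Pairwise (fun b c => pvLd b ≠ pvLd c) L := pvStair_ldNe L hBnz hstair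
  set v := pvRed L (pv30 x) with hv
  obtain ⟨s, hs, hve⟩ := pvRed_coset L (pv30 x)
  rw [← hv] at hve
  have hclr : ∀ b ∈ L, v.testBit (pvLd b) = false := pvRed_clears L (pv30 x) hBnz hstair
  have hvlead : v ≠ 0 → ¬ ∃ b ∈ L, pvLd v = pvLd b := by
    rintro hvne ⟨b, hb, he⟩
    have := pvLd_testBit v hvne
    rw [he, hclr b hb] at this
    exact absurd this (by simp)
  have hbits30 : ∀ j, 30 ≤ j → (pv30 x).testBit j = false := by
    intro j hj
    exact Nat.testBit_lt_two_pow (lt_of_lt_of_le (pv30_lt x)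
      (Nat.pow_le_pow_right (by norm_num) hj))
  rcases pvInner_spec 30 (le_refl 30) basis x hA hbits30 with ⟨hres, hsp⟩ | hcase
  · -- A makes no insertion: x is in the span; B must not append either
    have hxSp : pvSp L (pv30 x) := (hspan _).mp hsp
    have hvSp : pvSp L v := by rw [hve]; exact pvSp.xor hxSp hs
    have hv0 : v = 0 := by
      by_contra hvne
      exact hvlead hvne (pvSp_lead L hldne hBnz hvSp hvne)
    rw [if_neg (by omega), hres]
    exact ⟨hA, hBn, hstair, hbij, hspan⟩
  · obtain ⟨j, c, sA, hj30, hsA, hvac, hres, hceq, hcb, hcab⟩ := hcase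
    have hjlen : j < basis.length := hA.1 ▸ hj30
    have hldc : pvLd (pv30 c) = j := pvLd_eq_of _ _ hcb hcab
    have hcnz : pv30 c ≠ 0 := pv_testBit_ne_zero hcb
    have hcInt : c ≠ 0 := fun h0 => hcnz (by rw [h0]; decide)
    have hnotocc : ¬ ∃ b ∈ L, pvLd b = j := fun he => absurd ((hbij j hj30).mpr he) (by rw [hvac]; simp)
    have hvne : v ≠ 0 := by
      intro h0
      have hx : pv30 x = s := by
        rw [hve] at h0; exact Nat.xor_eq_zero_iff.mp h0
      have hcSp : pvSp L (pv30 c) := by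
        rw [hceq, hx]
        exact pvSp.xor hs ((hspan _).mp hsA)
      obtain ⟨b, hb, he⟩ := pvSp_lead L hldne hBnz hcSp hcnz
      exact hnotocc ⟨b, hb, by rw [← he, hldc]⟩
    rw [if_pos hvne, hres]
    have hxor4 : ∀ a b c' : Nat, (a ^^^ b) ^^^ (a ^^^ c') = b ^^^ c' := by
      intro a b c'
      apply Nat.eq_of_testBit_eq
      intro i
      simp only [Nat.testBit_xor]
      cases a.testBit i <;> cases b.testBit i <;> cases c'.testBit i <;> rfl
    have hdL : pvSp L (pv30 c ^^^ v) := by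
      rw [hceq, hve, hxor4]
      exact pvSp.xor ((hspan _).mp hsA) hs
    have hvld : pvLd v = j := by
      by_contra hne
      have hldsne : pvLd (pv30 c) ≠ pvLd v := by rw [hldc]; exact fun he => hne he.symm
      obtain ⟨hdne, hdmax⟩ := pv_ldXor hcnz hvne hldsne
      obtain ⟨b, hb, he⟩ := pvSp_lead L hldne hBnz hdL hdne
      rcases max_choice (pvLd (pv30 c)) (pvLd v) with hm | hm
      · rw [hdmax, hm, hldc] at he; exact hnotocc ⟨b, hb, he.symm⟩
      · rw [hdmax, hm] at he; exact hvlead hvne ⟨b, hb, he⟩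
    have hgd : ∀ i, (basis.set j c).getD i 0 = if i = j then c else basis.getD i 0 :=
      fun i => pv_getD_set basis j i c hjlen
    have hmemL' : ∀ b : Nat, b ∈ L ++ [v] ↔ b ∈ L ∨ b = v := by
      intro b; simp
    refine ⟨⟨by rw [List.length_set]; exact hA.1, ?_⟩, ?_, ?_, ?_, ?_⟩
    · -- array invariant
      intro i hi hnz'
      rw [hgd i] at hnz' ⊢
      by_cases hij : i = j
      · subst hij
        rw [if_pos rfl] at hnz' ⊢
        exact ⟨hcb, hcab⟩
      · rw [if_neg hij] at hnz' ⊢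
        exact hA.2 i hi hnz'
    · -- nonzero and bounded
      intro b hb
      rcases (hmemL' b).mp hb with h | rfl
      · exact hBn b h
      · exact ⟨hvne, lt_of_le_of_lt (pvRed_le L (pv30 x)) (pv30_lt x)⟩
    · -- staircase
      refine List.pairwise_append.mpr ⟨hstair, List.pairwise_singleton _ _, ?_⟩
      intro b hb c' hc'
      rw [List.mem_singleton.mp hc']
      exact hclr b hb
    · -- lead bijection
      intro i hi
      rw [hgd i]
      by_cases hij : i = j
      · subst hij
        rw [if_pos rfl]
        constructor
        · intro _; exact ⟨v, (hmemL' v).mpr (Or.inr rfl), hvld⟩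
        · intro _; exact hcInt
      · rw [if_neg hij]
        rw [hbij i hi]
        constructor
        · rintro ⟨b, hb, he⟩; exact ⟨b, (hmemL' b).mpr (Or.inl hb), he⟩
        · rintro ⟨b, hb, he⟩
          rcases (hmemL' b).mp hb with h | rfl
          · exact ⟨b, h, he⟩
          · rw [hvld] at he; exact absurd he.symm hij
    · -- span equality
      intro w
      have hEmem : ∀ e, e ∈ pvE (basis.set j c) ↔ e ∈ (pv30 c :: pvE basis) := by
        intro e
        rw [pvE_mem, List.mem_cons, pvE_mem]
        constructor
        · rintro ⟨i, hi, hnz', he⟩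
          rw [hgd i] at hnz' he
          by_cases hij : i = j
          · subst hij; rw [if_pos rfl] at he; exact Or.inl he
          · rw [if_neg hij] at hnz' he; exact Or.inr ⟨i, hi, hnz', he⟩
        · rintro (he | ⟨i, hi, hnz', he⟩)
          · refine ⟨j, hj30, ?_, ?_⟩ <;> rw [hgd j, if_pos rfl]
            · exact hcInt
            · exact he
          · have hij : i ≠ j := fun hh => hnz' (hh ▸ hvac)
            refine ⟨i, hi, ?_, ?_⟩ <;> rw [hgd i, if_neg hij]
            · exact hnz'
            · exact he
      rw [pvSp_ext_iff hEmem w,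
        pvSp_cons_congr hspan ((hspan _).mpr hdL) w,
        pvSp_ext_iff (fun e => by rw [hmemL' e, List.mem_cons, or_comm]) w]

def pvStepN (L : List Nat) (x : Int) : List Nat :=
  if pvRed L (pv30 x) ≠ 0 then L ++ [pvRed L (pv30 x)] else L

theorem pv_fold (a : List Int) : ∀ (basis : List Int) (L : List Nat), pvInv2 basis L →
    pvInv2 (a.foldl (fun b x => sol009InnerA b x ((List.range 30).reverse)) basis)
      (a.foldl pvStepN L) := by
  induction a with
  | nil => intro basis L h; exact h
  | cons x a ih =>
    intro basis L h
    exact ih _ _ (pvStep basis L h x)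

theorem pv_rep_getD' : ∀ (n i : Nat), (List.replicate n (0:Int)).getD i 0 = 0 := by
  intro n
  induction n with
  | zero => intro i; rfl
  | succ n ih =>
    intro i
    rw [List.replicate_succ]
    cases i with
    | zero => rfl
    | succ i => rw [List.getD_cons_succ]; exact ih i

theorem pv_rep_getD (i : Nat) : (List.replicate 30 (0:Int)).getD i 0 = 0 := pv_rep_getD' 30 i

theorem pv_init : pvInv2 (List.replicate 30 0) [] := by
  refine ⟨⟨List.length_replicate, ?_⟩, ?_, ?_, ?_, ?_⟩
  · intro i _ hnz; exact absurd (pv_rep_getD i) hnz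
  · intro b hb; simp at hb
  · exact List.Pairwise.nil
  · intro i _
    rw [pv_rep_getD i]
    constructor
    · intro h; exact absurd rfl h
    · rintro ⟨b, hb, _⟩; simp at hb
  · intro v
    refine pvSp_ext_iff (fun e => ?_) v
    rw [pvE_mem]
    constructor
    · rintro ⟨i, _, hnz, _⟩; exact absurd (pv_rep_getD i) hnz
    · intro h; simp at h

theorem pv_band_mask (x : Int) :
    PySem.Int.band x (((1 : Int) <<< (30 : Nat)) - 1) = ((pv30 x : Nat) : Int) := by
  cases x with
  | ofNat n =>
    rw [pv_mask_eq, show (Int.ofNat n) = (n:Int) from rfl, PySem.Int.band_natCast,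
      show pv30 ((n : Nat) : Int) = n % 2^30 from pv30_ofNat n,
      Nat.and_two_pow_sub_one_eq_mod]
  | negSucc k =>
    rw [pv_mask_eq, pv_band_negSucc, pv30_negSucc, Nat.land_comm,
      Nat.and_two_pow_sub_one_eq_mod]

theorem pv_reduce_cast (L : List Nat) : ∀ v : Nat,
    sol009Reduce (L.map (fun n : Nat => (n : Int))) (v : Int) = ((pvRed L v : Nat) : Int) := by
  induction L with
  | nil => intro v; rfl
  | cons b L ih =>
    intro v
    show sol009Reduce (L.map _) (min (v:Int) (PySem.Int.bxor (v:Int) (b:Int))) = _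
    rw [PySem.Int.bxor_natCast, ← Nat.cast_min, ih (min v (v ^^^ b)), pvRed_cons]

theorem pv_basisB_cast (a : List Int) : ∀ L : List Nat,
    a.foldl
      (fun basis x =>
        let v := sol009Reduce basis (PySem.Int.band x (((1 : Int) <<< (30 : Nat)) - 1))
        if v ≠ 0 then basis ++ [v] else basis)
      (L.map (fun n : Nat => (n : Int)))
    = (a.foldl pvStepN L).map (fun n : Nat => (n : Int)) := by
  induction a with
  | nil => intro L; rfl
  | cons x a ih =>
    intro L
    rw [List.foldl_cons, List.foldl_cons]
    have hstep :
        (let v := sol009Reduce (L.map (fun n : Nat => (n : Int)))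
          (PySem.Int.band x (((1 : Int) <<< (30 : Nat)) - 1));
         if v ≠ 0 then L.map (fun n : Nat => (n : Int)) ++ [v]
         else L.map (fun n : Nat => (n : Int)))
        = (pvStepN L x).map (fun n : Nat => (n : Int)) := by
      simp only [pv_band_mask, pv_reduce_cast, pvStepN]
      by_cases hv : pvRed L (pv30 x) = 0
      · rw [if_neg (by simp [hv]), if_neg (by simp [hv])]
      · rw [if_pos (by simpa using hv), if_pos hv, List.map_append]
        rfl
    rw [hstep]
    exact ih (pvStepN L x)

theorem pv_scan (basis : List Int) (leads : List Int) : ∀ idxs : List Nat,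
    (∀ i ∈ idxs, (basis.getD i 0 = 0 ↔ ¬ leads.contains (i : Int) = true)) →
    sol009ScanA basis idxs = sol009ScanB leads idxs := by
  intro idxs
  induction idxs with
  | nil => intro _; rfl
  | cons i rest ih =>
    intro h
    show (if basis.getD i 0 = 0 then _ else _) = (if ¬ leads.contains (i:Int) then _ else _)
    by_cases hz : basis.getD i 0 = 0
    · rw [if_pos hz, if_pos (by exact (h i List.mem_cons_self).mp hz)]
    · rw [if_neg hz, if_neg (by
        intro hc
        exact hz ((h i List.mem_cons_self).mpr hc))]
      exact ih (fun j hj => h j (List.mem_cons_of_mem _ hj))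

theorem pv_main (a : List Int) : sol_009 a = sol_009_alt a := by
  have hinv := pv_fold a (List.replicate 30 0) [] pv_init
  obtain ⟨hA, hBn, _, hbij, _⟩ := hinv
  set LB := a.foldl pvStepN [] with hLB
  show sol009ScanA _ (List.range 30) = sol_009_alt a
  have hbas : sol009BasisB a = LB.map (fun n : Nat => (n : Int)) := pv_basisB_cast a []
  show sol009ScanA (a.foldl _ (List.replicate 30 0)) (List.range 30) = sol009ScanB _ (List.range 30)
  apply pv_scan
  intro i hi
  rw [List.mem_range] at hi
  have hcont : ((sol009BasisB a).map (fun b => ((PySem.Int.bitLength b : Int) - 1))).contains (i : Int) = true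
      ↔ ∃ b ∈ LB, pvLd b = i := by
    rw [hbas, List.contains_iff_exists_mem_beq]
    constructor
    · rintro ⟨y, hy, hbeq⟩
      simp only [List.mem_map] at hy
      obtain ⟨z, hz, rfl⟩ := hy
      obtain ⟨n, hn, rfl⟩ := hz
      refine ⟨n, hn, ?_⟩
      rw [pv_bitLength_eq n ((hBn n hn).1)] at hbeq
      have := eq_of_beq hbeq
      omega
    · rintro ⟨n, hn, rfl⟩
      refine ⟨((PySem.Int.bitLength ((n:Nat) : Int) : Int) - 1), ?_, ?_⟩
      · simp only [List.mem_map]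
        exact ⟨(n : Int), ⟨n, hn, rfl⟩, rfl⟩
      · rw [pv_bitLength_eq n ((hBn n hn).1)]
        have : ((pvLd n + 1 : Nat) : Int) - 1 = ((pvLd n : Nat) : Int) := by omega
        rw [this]
        exact beq_self_eq_true _
  constructor
  · intro hz hc
    rw [hcont] at hc
    exact absurd hz (by intro h0; exact ((hbij i hi).mpr hc) h0)
  · intro hc
    by_contra hz
    exact hc (hcont.mpr ((hbij i hi).mp hz))

-- ===== VERDICT (by name: the statement is the Claim_ definition above) =====
theorem sol_009_spec : Claim_equal_sol_009 := by
  intro a _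
  unfold Spec_sol_009
  exact pv_main a
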